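-- pv_equiv track=rewrite | github.com/razbackup/Python-Duoc | Tipo-Prueba-Avion/functions.py | check_asiento
-- ===== SOURCE A (Python) =====
-- def check_asiento(num,asientos):
--     if int(num) > 42 or int(num) < 1:
--         return False
--     aux = []
--     for i in asientos:
--         for j in i:
--             aux.append(j)
--     if aux.count(num):
--         return True
--     else:
--         return False
-- ===== SOURCE B (Python) =====
-- def _bisect_left(a, x):
--     lo, hi = 0, len(a)
--     while lo < hi:
--         mid = (lo + hi) // 2
--         if a[mid] < x:
--             lo = mid + 1
--         else:
--             hi = mid
--     return lo
--
-- def check_asiento(num, asientos):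
--     if int(num) > 42 or int(num) < 1:
--         return False
--     flat = sorted(x for row in asientos for x in row)
--     i = _bisect_left(flat, num)
--     return i < len(flat) and flat[i] == num
-- ===== Notes on version B (the rewrite author's own statement) =====
-- stated objective: alternative
-- what changed: B replaces A's flatten-then-count linear scan with a sort of all seats followed by a hand-written binary search (bisect_left) for num; it trades the single scan for an O(n log n) sort plus O(log n) lookup.
import Mathlib
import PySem

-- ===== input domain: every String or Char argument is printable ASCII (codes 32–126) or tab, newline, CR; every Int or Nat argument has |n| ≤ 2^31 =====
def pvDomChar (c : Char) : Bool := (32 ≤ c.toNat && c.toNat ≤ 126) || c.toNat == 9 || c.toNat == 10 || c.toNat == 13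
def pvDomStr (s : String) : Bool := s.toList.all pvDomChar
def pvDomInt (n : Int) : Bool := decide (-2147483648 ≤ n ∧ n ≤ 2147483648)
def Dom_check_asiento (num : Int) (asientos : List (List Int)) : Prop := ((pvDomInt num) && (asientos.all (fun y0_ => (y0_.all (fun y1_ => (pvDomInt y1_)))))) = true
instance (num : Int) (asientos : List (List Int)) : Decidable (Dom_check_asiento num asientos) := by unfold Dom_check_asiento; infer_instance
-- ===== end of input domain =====

-- B replaces A's flatten-then-count scan with sort + hand-written binary search (objective: alternative).

-- ===== PORT A =====
def check_asiento (num : Int) (asientos : List (List Int)) : Bool :=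
  if num > 42 || num < 1 then false
  else
    -- aux = []; for i in asientos: for j in i: aux.append(j)
    let aux := asientos.foldl (fun acc i => i.foldl (fun acc2 j => acc2 ++ [j]) acc) []
    -- if aux.count(num): return True else: return False
    if PySem.List.count aux num ≠ 0 then true else false

-- ===== PORT B =====
-- _bisect_left: while lo < hi: mid = (lo+hi)//2; if a[mid] < x: lo = mid+1 else: hi = mid
-- (indices stay in [0, len a), so a.getD mid 0 is exactly Python's a[mid] here)
-- fuel = initial interval width bounds the iteration count; it only makes the loop total
def bisectGo (a : List Int) (x : Int) : Nat → Nat → Nat → Nat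
  | 0, lo, _ => lo
  | fuel + 1, lo, hi =>
    if lo < hi then
      let mid := (lo + hi) / 2
      if a.getD mid 0 < x then bisectGo a x fuel (mid + 1) hi
      else bisectGo a x fuel lo mid
    else lo

def check_asiento_alt (num : Int) (asientos : List (List Int)) : Bool :=
  if num > 42 || num < 1 then false
  else
    let flat := PySem.List.sorted (asientos.flatMap id) (fun x => x) false
    let i := bisectGo flat num flat.length 0 flat.length
    decide (i < flat.length) && (flat.getD i 0 == num)

-- ===== PRECONDITION & SPEC =====
def Spec_check_asiento (num : Int) (asientos : List (List Int)) (out : Bool) : Prop := out = check_asiento_alt num asientos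
instance (num : Int) (asientos : List (List Int)) (out : Bool) : Decidable (Spec_check_asiento num asientos out) := by unfold Spec_check_asiento; infer_instance

-- ===== CLAIM =====
def Claim_equal_check_asiento : Prop := ∀ (num : Int) (asientos : List (List Int)), Dom_check_asiento num asientos → Spec_check_asiento num asientos (check_asiento num asientos)

-- ===== LEMMAS AND PROOFS =====

-- A's nested append loops compute acc ++ flatten.
lemma auxFlatten (asientos : List (List Int)) (acc : List Int) :
    asientos.foldl (fun acc i => i.foldl (fun acc2 j => acc2 ++ [j]) acc) acc
      = acc ++ asientos.flatten := by
  induction asientos generalizing acc with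
  | nil => simp
  | cons row rest ih =>
    simp only [List.foldl_cons, List.flatten_cons, ih]
    rw [PySem.List.foldl_append_singleton]
    simp

-- Binary-search invariant: on a sorted list, the loop returns an index r ≤ |a| with
-- everything below r strictly below x and nothing at or above r strictly below x.
lemma getD_eq_get_int (a : List Int) (k : Nat) (h : k < a.length) : a.getD k 0 = a[k] := by
  simp [List.getD_eq_getElem?_getD, List.getElem?_eq_getElem h]

lemma bisectGo_spec (a : List Int) (x : Int) (hs : a.Pairwise (· ≤ ·)) :
    ∀ fuel lo hi, hi - lo ≤ fuel → lo ≤ hi → hi ≤ a.length →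
      (∀ k, k < lo → a.getD k 0 < x) →
      (∀ k, hi ≤ k → k < a.length → ¬ a.getD k 0 < x) →
      (∀ k, k < bisectGo a x fuel lo hi → a.getD k 0 < x) ∧
        (∀ k, bisectGo a x fuel lo hi ≤ k → k < a.length → ¬ a.getD k 0 < x) ∧
        bisectGo a x fuel lo hi ≤ a.length := by
  intro fuel
  induction fuel with
  | zero =>
    intro lo hi hn hlohi hhi hlow hhigh
    have he : lo = hi := by omega
    subst he
    simp only [bisectGo]
    exact ⟨hlow, fun k hk hk' => hhigh k hk hk', by omega⟩
  | succ fuel ih =>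
    intro lo hi hn hlohi hhi hlow hhigh
    simp only [bisectGo]
    by_cases h : lo < hi
    · rw [if_pos h]
      have hmidlt : (lo + hi) / 2 < a.length := by omega
      by_cases hb : a.getD ((lo + hi) / 2) 0 < x
      · simp only [hb, if_pos]
        refine ih _ _ (by omega) (by omega) hhi ?_ hhigh
        intro k hk
        rcases Nat.lt_or_ge k lo with hkl | hkl
        · exact hlow k hkl
        · have hk' : k < a.length := by omega
          have : a.getD k 0 ≤ a.getD ((lo + hi) / 2) 0 := by
            rcases Nat.eq_or_lt_of_le (by omega : k ≤ (lo + hi) / 2) with he | hlt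
            · rw [he]
            · have := (List.pairwise_iff_getElem.mp hs) k ((lo + hi) / 2) hk' hmidlt hlt
              rw [getD_eq_get_int a k hk', getD_eq_get_int a _ hmidlt]
              exact this
          omega
      · simp only [hb, if_neg, if_false]
        refine ih _ _ (by omega) (by omega) (by omega) hlow ?_
        intro k hk hk'
        have : a.getD ((lo + hi) / 2) 0 ≤ a.getD k 0 := by
          rcases Nat.eq_or_lt_of_le hk with he | hlt
          · rw [he]
          · have := (List.pairwise_iff_getElem.mp hs) ((lo + hi) / 2) k hmidlt hk' hlt
            rw [getD_eq_get_int a k hk', getD_eq_get_int a _ hmidlt]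
            exact this
        omega
    · rw [if_neg h]
      exact ⟨hlow, fun k hk hk' => hhigh k (by omega) hk', by omega⟩

-- On a sorted list, the binary-search membership test decides x ∈ a.
lemma bisect_mem (a : List Int) (x : Int) (hs : a.Pairwise (· ≤ ·)) :
    (decide (bisectGo a x a.length 0 a.length < a.length) &&
      (a.getD (bisectGo a x a.length 0 a.length) 0 == x)) = decide (x ∈ a) := by
  obtain ⟨hlow, hhigh, hle⟩ :=
    bisectGo_spec a x hs a.length 0 a.length (by omega) (Nat.zero_le _) le_rfl
      (fun k hk => absurd hk (Nat.not_lt_zero k))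
      (fun k hk hk' => absurd hk' (by omega))
  set r := bisectGo a x a.length 0 a.length with hr
  by_cases hm : x ∈ a
  · obtain ⟨k, hk, hke⟩ := List.mem_iff_getElem.mp hm
    have hkd : a.getD k 0 = x := by rw [getD_eq_get_int a k hk]; exact hke
    have hkr : r ≤ k := by
      by_contra hc
      exact absurd (hlow k (by omega)) (by omega)
    have hrlen : r < a.length := by omega
    have h1 : ¬ a.getD r 0 < x := hhigh r le_rfl hrlen
    have h2 : a.getD r 0 ≤ x := by
      rcases Nat.eq_or_lt_of_le hkr with he | hlt
      · rw [he, hkd]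
      · have := (List.pairwise_iff_getElem.mp hs) r k hrlen hk hlt
        rw [getD_eq_get_int a r hrlen]
        omega
    have heq : a.getD r 0 = x := by omega
    rw [getD_eq_get_int a r hrlen] at heq
    simp [hrlen, heq, hm]
  · simp only [hm, decide_false]
    by_cases hrlen : r < a.length
    · have hne : a[r] ≠ x := fun he => hm (he ▸ List.getElem_mem hrlen)
      rw [getD_eq_get_int a r hrlen]
      simp [hne]
    · simp [hrlen]

-- ===== VERDICT =====
theorem check_asiento_spec : Claim_equal_check_asiento := by
  intro num asientos _
  unfold Spec_check_asiento check_asiento check_asiento_alt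
  by_cases hg : (num > 42 || num < 1) = true
  · simp [hg]
  · simp only [hg, Bool.false_eq_true, if_false]
    rw [auxFlatten]
    simp only [List.nil_append]
    have hsorted : (PySem.List.sorted (asientos.flatMap id) (fun x => x) false).Pairwise
        (fun a b => a ≤ b) := by
      simpa using PySem.List.sorted_pairwise (asientos.flatMap id) (fun x => x)
    rw [bisect_mem _ _ hsorted]
    have hcount : (PySem.List.count asientos.flatten num ≠ 0) ↔ num ∈ asientos.flatten := by
      simp [PySem.List.count, List.count_eq_zero]
    have hmem2 : (num ∈ PySem.List.sorted (asientos.flatMap id) (fun x => x) false) ↔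
        num ∈ asientos.flatten := by
      rw [PySem.List.mem_sorted]
      simp
    by_cases hf : num ∈ asientos.flatten
    · rw [if_pos (hcount.mpr hf)]
      simp [hmem2, hf]
    · rw [if_neg (fun hcc => hf (hcount.mp hcc))]
      simp [hmem2, hf]
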